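-- pv_equiv track=rewrite | github.com/ravalrupalj/BrainTeasers | Edabit/Pricey_Products.py | pricey_prod
-- ===== SOURCE A (Python) =====
-- def pricey_prod(d):
--     l=[]
--     val=[]
--     for i in d.values():
--         if i>=500:
--             val.append(i)
--     for each in sorted(val):
--         for i,j in d.items():
--             if j==each:
--                 l.append(i)
--     return l[::-1]
-- ===== SOURCE B (Python) =====
-- def pricey_prod(d):
--     # One sort of the qualifying (price, name) pairs, priciest first.
--     items = sorted(((v, k) for k, v in d.items() if v >= 500),
--                    key=lambda t: t[0], reverse=True)
--     return [k for _, k in items]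
-- ===== Notes on version B (the rewrite author's own statement) =====
-- stated objective: simpler
-- what changed: A collects qualifying prices and then rescans the whole dict once per collected price (nested scans) and finally reverses; B sorts the qualifying (price, name) pairs once in descending order and reads off the names.
-- intended difference: On dicts where some price >= 500 is shared by several products, A repeats each tied group of names once per tied product (e.g. {'a':600,'b':600} -> ['b','a','b','a']), while B lists each qualifying name exactly once in descending price order (['a','b']), which is what the task (names of products priced >= 500, priciest first) intends. — e.g. on pricey_prod([("a", 600), ("b", 600)]): A returns ["b", "a", "b", "a"], B returns ["a", "b"]
import Mathlib
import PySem

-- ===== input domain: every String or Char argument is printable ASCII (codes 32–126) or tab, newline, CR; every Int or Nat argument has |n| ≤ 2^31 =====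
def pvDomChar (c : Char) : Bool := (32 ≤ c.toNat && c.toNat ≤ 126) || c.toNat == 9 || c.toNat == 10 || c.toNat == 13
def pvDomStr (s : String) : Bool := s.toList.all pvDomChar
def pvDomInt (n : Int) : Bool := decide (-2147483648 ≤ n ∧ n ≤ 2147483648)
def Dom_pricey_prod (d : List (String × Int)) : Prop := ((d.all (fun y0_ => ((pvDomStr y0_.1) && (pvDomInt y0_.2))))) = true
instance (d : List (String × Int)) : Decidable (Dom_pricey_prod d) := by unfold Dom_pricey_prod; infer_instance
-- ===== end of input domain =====

-- B replaces A's per-price rescan of the whole dict by a single descending sort of the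
-- qualifying (price, name) pairs. Equivalence is proved outside D_ (tied prices ≥ 500).

-- ===== PORT A =====
def pricey_prod (d : List (String × Int)) : List String :=
  let dd := PySem.Dict.ofList d
  let val := dd.values.foldl (fun acc i => if (500 : Int) ≤ i then acc ++ [i] else acc) []
  let l := (PySem.List.sorted val (fun x => x) false).foldl
    (fun acc each => dd.items.foldl
      (fun acc2 p => if p.2 == each then acc2 ++ [p.1] else acc2) acc) []
  l.reverse  -- l[::-1]; exact: PySem.List.slice?_none_none_neg_one

-- ===== PORT B =====
def pricey_prod_alt (d : List (String × Int)) : List String :=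
  let dd := PySem.Dict.ofList d
  let items := PySem.List.sorted
    ((dd.items.filter (fun p => (500 : Int) ≤ p.2)).map (fun p => (p.2, p.1)))
    (fun t => t.1) true
  items.map (fun t => t.2)

-- ===== PRECONDITION & SPEC =====
-- On dicts where some price ≥ 500 is shared by several products, A repeats each tied group of
-- names once per tied product, while B lists each qualifying name exactly once in descending
-- price order, which is what the task (names of products priced ≥ 500, priciest first) intends.
def D_pricey_prod (d : List (String × Int)) : Prop :=
  ¬ (((PySem.Dict.ofList d).values.filter (fun v => (500 : Int) ≤ v)).Nodup)
instance (d : List (String × Int)) : Decidable (D_pricey_prod d) := by unfold D_pricey_prod; infer_instance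

def Spec_pricey_prod (d : List (String × Int)) (out : List String) : Prop :=
  ¬ D_pricey_prod d → out = pricey_prod_alt d
instance (d : List (String × Int)) (out : List String) : Decidable (Spec_pricey_prod d out) := by unfold Spec_pricey_prod; infer_instance

def pvDiffWitness_pricey_prod : (List (String × Int)) := [("a", 600), ("b", 600)]
def pvDiffWitnessOut_pricey_prod : (List String) × (List String) := (["b", "a", "b", "a"], ["a", "b"])

-- ===== CLAIM (what is proved, stated in full; the proofs are below) =====
def Claim_unchanged_pricey_prod : Prop := ∀ (d : List (String × Int)), Dom_pricey_prod d → Spec_pricey_prod d (pricey_prod d)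
def Claim_changed_pricey_prod : Prop := Dom_pricey_prod (pvDiffWitness_pricey_prod) ∧ D_pricey_prod (pvDiffWitness_pricey_prod) ∧ pricey_prod (pvDiffWitness_pricey_prod) = pvDiffWitnessOut_pricey_prod.1 ∧ pricey_prod_alt (pvDiffWitness_pricey_prod) = pvDiffWitnessOut_pricey_prod.2 ∧ pvDiffWitnessOut_pricey_prod.1 ≠ pvDiffWitnessOut_pricey_prod.2
def Claim_exact_pricey_prod : Prop := ∀ (d : List (String × Int)), Dom_pricey_prod d → D_pricey_prod d → pricey_prod d ≠ pricey_prod_alt d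

-- ===== LEMMAS AND PROOFS =====

theorem pairwise_lt_of_pairwise_le_nodup {α : Type} (l : List (α × Int))
    (hle : l.Pairwise (fun a b => a.2 ≤ b.2)) (hnd : (l.map Prod.snd).Nodup) :
    l.Pairwise (fun a b => a.2 < b.2) := by
  rw [List.nodup_iff_pairwise_ne, List.pairwise_map] at hnd
  exact (hle.and hnd).imp (fun h => lt_of_le_of_ne h.1 h.2)

theorem eq_of_perm_len_le_one {α : Type} {l1 l2 : List α} (h : l1.Perm l2) (hl : l2.length ≤ 1) : l1 = l2 := by
  match l2, hl with
  | [], _ => exact List.perm_nil.1 h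
  | [a], _ => exact List.perm_singleton.1 h

theorem flatMap_filter_map_snd (g : List (String × Int))
    (hnd : (g.map Prod.snd).Nodup) :
    (g.map Prod.snd).flatMap (fun v => (g.filter (fun p => p.2 == v)).map Prod.fst) = g.map Prod.fst := by
  induction g with
  | nil => simp
  | cons a t ih =>
    simp only [List.map_cons, List.nodup_cons] at hnd
    obtain ⟨hnot, hnd'⟩ := hnd
    have ht : t.filter (fun p => p.2 == a.2) = [] := by
      rw [List.filter_eq_nil_iff]
      intro p hp hbeq
      simp only [beq_iff_eq] at hbeq
      exact hnot (List.mem_map.2 ⟨p, hp, hbeq⟩)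
    have hcongr : ∀ v ∈ t.map Prod.snd,
        ((a :: t).filter (fun p => p.2 == v)).map Prod.fst = (t.filter (fun p => p.2 == v)).map Prod.fst := by
      intro v hv
      rw [List.filter_cons_of_neg]
      simp only [beq_iff_eq]
      intro hav
      exact hnot (hav ▸ hv)
    simp only [List.map_cons, List.flatMap_cons]
    rw [List.flatMap_congr hcongr, ih hnd', List.filter_cons_of_pos (by simp), ht]
    simp

theorem main_eq (e : List (String × Int))
    (h : ((e.map Prod.snd).filter (fun v => (500:Int) ≤ v)).Nodup) :
    ((PySem.List.sorted ((e.map Prod.snd).foldl (fun acc i => if (500:Int) ≤ i then acc ++ [i] else acc) []) (fun x => x) false).foldl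
        (fun acc each => e.foldl (fun acc2 p => if p.2 == each then acc2 ++ [p.1] else acc2) acc) []).reverse
    = (PySem.List.sorted ((e.filter (fun p => (500:Int) ≤ p.2)).map (fun p => (p.2, p.1))) (fun t => t.1) true).map (fun t => t.2) := by
  have hval : (e.map Prod.snd).foldl (fun acc i => if (500:Int) ≤ i then acc ++ [i] else acc) []
      = (e.filter (fun p => (500:Int) ≤ p.2)).map Prod.snd := by
    rw [PySem.List.foldl_append_ite_eq_filter, List.nil_append, List.filter_map]; rfl
  set f := e.filter (fun p => (500:Int) ≤ p.2) with hf
  have hndf : (f.map Prod.snd).Nodup := by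
    rw [hf, ← show (e.map Prod.snd).filter (fun v => (500:Int) ≤ v) = (e.filter (fun p => (500:Int) ≤ p.2)).map Prod.snd by rw [List.filter_map]; rfl]
    exact h
  set g := PySem.List.sorted f (fun p => p.2) false with hg
  have hperm : g.Perm f := PySem.List.sorted_perm f (fun p => p.2) false
  have hndg : (g.map Prod.snd).Nodup := ((hperm.map Prod.snd).nodup_iff).2 hndf
  have hpl : g.Pairwise (fun a b => a.2 < b.2) :=
    pairwise_lt_of_pairwise_le_nodup g (PySem.List.sorted_pairwise f (fun p => p.2)) hndg
  have hsortedvals : PySem.List.sorted (f.map Prod.snd) (fun x => x) false = g.map Prod.snd :=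
    PySem.List.sorted_eq_of_perm_of_pairwise_lt _ _ (fun x => x) (hperm.map Prod.snd) (by rw [List.pairwise_map]; exact hpl)
  have houter : ∀ (L : List Int), L.foldl (fun acc each => e.foldl (fun acc2 p => if p.2 == each then acc2 ++ [p.1] else acc2) acc) []
      = L.flatMap (fun each => (e.filter (fun p => p.2 == each)).map Prod.fst) := by
    intro L
    have : ∀ (acc : List String) (each : Int),
        e.foldl (fun acc2 p => if p.2 == each then acc2 ++ [p.1] else acc2) acc
        = acc ++ (e.filter (fun p => p.2 == each)).map Prod.fst := by
      intro acc each
      exact PySem.List.foldl_append_if (fun p => p.2 == each) Prod.fst e acc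
    simp only [this]
    rw [PySem.List.foldl_append_eq_flatMap, List.nil_append]
  have hfil : ∀ v ∈ g.map Prod.snd,
      (e.filter (fun p => p.2 == v)).map Prod.fst = (g.filter (fun p => p.2 == v)).map Prod.fst := by
    intro v hv
    obtain ⟨p, hp, rfl⟩ := List.mem_map.1 hv
    have hpf : p ∈ f := (PySem.List.mem_sorted _ _ _ _).1 hp
    have hv500 : (500:Int) ≤ p.2 := by
      have := List.of_mem_filter hpf
      simpa using this
    have he : e.filter (fun q => q.2 == p.2) = f.filter (fun q => q.2 == p.2) := by
      rw [hf, List.filter_filter]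
      apply List.filter_congr
      intro q _
      by_cases hqe : q.2 = p.2
      · simp [hqe, hv500]
      · simp [hqe]
    have hlen : (g.filter (fun q => q.2 == p.2)).length ≤ 1 := by
      have hcle := List.nodup_iff_count_le_one.1 hndg p.2
      have : (g.filter (fun q => q.2 == p.2)).length = (g.map Prod.snd).count p.2 := by
        rw [← List.countP_eq_length_filter, List.count, List.countP_map]; rfl
      omega
    rw [he, eq_of_perm_len_le_one (hperm.filter _).symm hlen]
  calc ((PySem.List.sorted ((e.map Prod.snd).foldl (fun acc i => if (500:Int) ≤ i then acc ++ [i] else acc) []) (fun x => x) false).foldl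
        (fun acc each => e.foldl (fun acc2 p => if p.2 == each then acc2 ++ [p.1] else acc2) acc) []).reverse
      = ((g.map Prod.snd).flatMap (fun each => (e.filter (fun p => p.2 == each)).map Prod.fst)).reverse := by
        rw [hval, hsortedvals, houter]
    _ = ((g.map Prod.snd).flatMap (fun each => (g.filter (fun p => p.2 == each)).map Prod.fst)).reverse := by
        rw [List.flatMap_congr hfil]
    _ = (g.map Prod.fst).reverse := by rw [flatMap_filter_map_snd g hndg]
    _ = (PySem.List.sorted (f.map (fun p => (p.2, p.1))) (fun t => t.1) true).map (fun t => t.2) := by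
        have hrev : PySem.List.sorted (f.map (fun p => (p.2, p.1))) (fun t => t.1) true
            = ((g.map (fun p => (p.2, p.1)))).reverse := by
          apply PySem.List.sorted_rev_eq_of_perm_of_pairwise_gt
          · exact (List.reverse_perm _).trans (hperm.map _)
          · rw [List.pairwise_reverse, List.pairwise_map]
            exact hpl.imp (fun h => h)
        rw [hrev, List.map_reverse, List.map_map]; rfl

theorem length_le_sum_of_one (xs : List Nat) (h1 : ∀ x ∈ xs, 1 ≤ x) : xs.length ≤ xs.sum := by
  induction xs with
  | nil => simp
  | cons a t ih =>
    simp only [List.length_cons, List.sum_cons]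
    have ha := h1 a (by simp)
    have ht := ih (fun x hx => h1 x (by simp [hx]))
    omega

theorem length_lt_sum_of_two (xs : List Nat) (h1 : ∀ x ∈ xs, 1 ≤ x) (h2 : ∃ x ∈ xs, 2 ≤ x) :
    xs.length < xs.sum := by
  induction xs with
  | nil => obtain ⟨x, hx, _⟩ := h2; simp at hx
  | cons a t ih =>
    simp only [List.length_cons, List.sum_cons]
    obtain ⟨x, hx, h2x⟩ := h2
    rcases List.mem_cons.1 hx with rfl | hxt
    · have := length_le_sum_of_one t (fun y hy => h1 y (by simp [hy]))
      omega
    · have := ih (fun y hy => h1 y (by simp [hy])) ⟨x, hxt, h2x⟩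
      have := h1 a (by simp)
      omega

theorem main_ne (e : List (String × Int))
    (h : ¬ ((e.map Prod.snd).filter (fun v => (500:Int) ≤ v)).Nodup) :
    ((PySem.List.sorted ((e.map Prod.snd).foldl (fun acc i => if (500:Int) ≤ i then acc ++ [i] else acc) []) (fun x => x) false).foldl
        (fun acc each => e.foldl (fun acc2 p => if p.2 == each then acc2 ++ [p.1] else acc2) acc) []).reverse
    ≠ (PySem.List.sorted ((e.filter (fun p => (500:Int) ≤ p.2)).map (fun p => (p.2, p.1))) (fun t => t.1) true).map (fun t => t.2) := by
  have hval : (e.map Prod.snd).foldl (fun acc i => if (500:Int) ≤ i then acc ++ [i] else acc) []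
      = (e.filter (fun p => (500:Int) ≤ p.2)).map Prod.snd := by
    rw [PySem.List.foldl_append_ite_eq_filter, List.nil_append, List.filter_map]; rfl
  set f := e.filter (fun p => (500:Int) ≤ p.2) with hf
  set vals := f.map Prod.snd with hvals
  have hndv : ¬ vals.Nodup := by
    rw [hvals, hf, ← show (e.map Prod.snd).filter (fun v => (500:Int) ≤ v) = (e.filter (fun p => (500:Int) ≤ p.2)).map Prod.snd by rw [List.filter_map]; rfl]
    exact h
  have houter : ∀ (L : List Int), L.foldl (fun acc each => e.foldl (fun acc2 p => if p.2 == each then acc2 ++ [p.1] else acc2) acc) []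
      = L.flatMap (fun each => (e.filter (fun p => p.2 == each)).map Prod.fst) := by
    intro L
    have hin : ∀ (acc : List String) (each : Int),
        e.foldl (fun acc2 p => if p.2 == each then acc2 ++ [p.1] else acc2) acc
        = acc ++ (e.filter (fun p => p.2 == each)).map Prod.fst := by
      intro acc each
      exact PySem.List.foldl_append_if (fun p => p.2 == each) Prod.fst e acc
    simp only [hin]
    rw [PySem.List.foldl_append_eq_flatMap, List.nil_append]
  have hfil : ∀ v ∈ PySem.List.sorted vals (fun x => x) false,
      ((e.filter (fun p => p.2 == v)).map Prod.fst).length = vals.count v := by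
    intro v hv
    have hvv : v ∈ vals := (PySem.List.mem_sorted _ _ _ _).1 hv
    obtain ⟨p, hpf, rfl⟩ := List.mem_map.1 hvv
    have hv500 : (500:Int) ≤ p.2 := by simpa using List.of_mem_filter hpf
    have he : e.filter (fun q => q.2 == p.2) = f.filter (fun q => q.2 == p.2) := by
      rw [hf, List.filter_filter]
      apply List.filter_congr
      intro q _
      by_cases hqe : q.2 = p.2
      · simp [hqe, hv500]
      · simp [hqe]
    rw [he, List.length_map, hvals, ← List.countP_eq_length_filter, List.count, List.countP_map]; rfl
  intro heq
  have hlen := congrArg List.length heq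
  rw [hval, houter, List.length_reverse, List.length_flatMap] at hlen
  rw [List.map_congr_left hfil] at hlen
  rw [List.length_map, PySem.List.length_sorted, List.length_map] at hlen
  have hperm : (PySem.List.sorted vals (fun x => x) false).Perm vals := PySem.List.sorted_perm _ _ _
  rw [(hperm.map (fun v => vals.count v)).sum_eq] at hlen
  obtain ⟨a, ha⟩ : ∃ a, 2 ≤ vals.count a := by
    by_contra hc
    push Not at hc
    exact hndv (List.nodup_iff_count_le_one.2 (fun a => by have := hc a; omega))
  have hamem : a ∈ vals := List.count_pos_iff.1 (by omega)
  have hlt := length_lt_sum_of_two (vals.map (fun v => vals.count v))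
      (by intro x hx; obtain ⟨v, hv, rfl⟩ := List.mem_map.1 hx; exact List.count_pos_iff.2 hv)
      ⟨vals.count a, List.mem_map.2 ⟨a, hamem, rfl⟩, ha⟩
  rw [List.length_map] at hlt
  have hvl : vals.length = f.length := by rw [hvals, List.length_map]
  omega

-- ===== VERDICT (by name: the statement is the Claim_ definition above) =====
theorem pricey_prod_spec : Claim_unchanged_pricey_prod := by
  intro d _
  unfold Spec_pricey_prod
  intro hD
  unfold D_pricey_prod at hD
  rw [not_not] at hD
  unfold pricey_prod pricey_prod_alt
  exact main_eq (PySem.Dict.ofList d).items hD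

theorem pricey_prod_changed : Claim_changed_pricey_prod := by unfold Claim_changed_pricey_prod; decide

theorem pricey_prod_tight : Claim_exact_pricey_prod := by
  intro d _ hD
  unfold D_pricey_prod at hD
  unfold pricey_prod pricey_prod_alt
  exact main_ne (PySem.Dict.ofList d).items hD
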